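-- pv_equiv track=rewrite | github.com/saulrichardson/credit-agreement-extraction | scripts/table_classifier_prototype.py | infer_headers
-- ===== SOURCE A (Python) =====
-- from typing import Iterable, List
--
-- PLACEHOLDER_GLYPHS = {"■", "¨", "□", "☐", "&nbsp;", "\xa0"}
--
-- def is_placeholder(text: str) -> bool:
--     stripped = text.strip()
--     if not stripped:
--         return True
--     if stripped in PLACEHOLDER_GLYPHS:
--         return True
--     if all(ch in {"·", ".", "-"} for ch in stripped):
--         return True
--     return False
--
-- def infer_headers(rows: List[List[str]], labels: List[str]) -> list[str]:
--     results: list[str] = []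
--     pending_headers: list[str] = []
--     for row, label in zip(rows, labels, strict=False):
--         if label == "header":
--             header_text = " | ".join(cell for cell in row if cell)
--             pending_headers.append(header_text)
--             continue
--         value_cells = [cell for cell in row if cell and not is_placeholder(cell)]
--         header = " | ".join(pending_headers) if pending_headers else ""
--         value = " | ".join(value_cells)
--         if header or value:
--             results.append(f"{header}: {value}".strip(": "))
--         pending_headers = []
--     return results
-- ===== SOURCE B (Python) =====
-- PLACEHOLDER_GLYPHS = {"■", "¨", "□", "☐", "&nbsp;", "\xa0"}
--
-- def is_placeholder(text: str) -> bool: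
--     stripped = text.strip()
--     if not stripped:
--         return True
--     if stripped in PLACEHOLDER_GLYPHS:
--         return True
--     if all(ch in {"·", ".", "-"} for ch in stripped):
--         return True
--     return False
--
-- def _fmt(header, row):
--     value = " | ".join(c for c in row if c and not is_placeholder(c))
--     if header or value:
--         return f"{header}: {value}".strip(": ")
--     return None
--
-- def _emit_run(header, vals):
--     # only the first row of a value run sees the header
--     out = []
--     for row, _ in vals:
--         s = _fmt(header, row)
--         if s is not None:
--             out.append(s)
--         header = ""
--     return out
--
-- def infer_headers(rows, labels):
--     pairs = list(zip(rows, labels))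
--     n = len(pairs)
--     out = []
--     i = 0
--     while i < n:
--         # leading header run -> one joined header string
--         k = i
--         while k < n and pairs[k][1] == "header":
--             k += 1
--         header = " | ".join(" | ".join(c for c in row if c) for row, _ in pairs[i:k])
--         # following value run
--         m = k
--         while m < n and pairs[m][1] != "header":
--             m += 1
--         out += _emit_run(header, pairs[k:m])
--         i = m
--     return out
-- ===== Notes on version B (the rewrite author's own statement) =====
-- stated objective: alternative
-- what changed: A's single loop with a mutable pending-headers accumulator reset on every value row is replaced by a recursive decomposition of zip(rows, labels) into alternating header/value runs: each header run is joined into one header string that only the first row of the following value run receives.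
import Mathlib
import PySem

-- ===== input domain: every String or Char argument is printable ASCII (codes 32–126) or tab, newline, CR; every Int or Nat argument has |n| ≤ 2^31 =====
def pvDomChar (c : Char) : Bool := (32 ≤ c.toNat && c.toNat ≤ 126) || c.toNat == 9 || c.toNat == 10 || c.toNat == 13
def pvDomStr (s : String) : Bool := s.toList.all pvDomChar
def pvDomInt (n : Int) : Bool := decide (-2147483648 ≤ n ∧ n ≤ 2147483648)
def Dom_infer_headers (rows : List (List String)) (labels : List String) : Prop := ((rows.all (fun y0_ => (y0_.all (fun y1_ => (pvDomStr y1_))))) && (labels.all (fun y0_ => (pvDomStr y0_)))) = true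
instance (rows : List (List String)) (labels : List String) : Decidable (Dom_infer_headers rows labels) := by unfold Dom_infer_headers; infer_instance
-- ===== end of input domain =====

-- B replaces A's single stateful loop (pending-header accumulator mutated and reset row by row)
-- with a recursive split into alternating header/value runs; objective: alternative decomposition.

-- ===== PORT A =====
-- module helper is_placeholder (identical in both Pythons)
def is_placeholder (text : String) : Bool :=
  let stripped := PySem.Str.strip text
  if stripped == "" then true
  else if ["■", "¨", "□", "☐", "&nbsp;", "\xa0"].contains stripped then true
  else if stripped.toList.all (fun ch => ['·', '.', '-'].contains ch) then true
  else false

-- " | ".join(cell for cell in row if cell)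
def hdrText (row : List String) : String :=
  PySem.Str.join " | " (row.filter (fun c => c != ""))

-- A's for-loop over zip(rows, labels) with state (pending_headers, results)
def goA : List (List String × String) → List String → List String → List String
  | [], _, results => results
  | (row, label) :: rest, pending, results =>
    if label == "header" then
      goA rest (pending ++ [hdrText row]) results
    else
      let value_cells := row.filter (fun c => c != "" && !is_placeholder c)
      let header := if pending.isEmpty = false then PySem.Str.join " | " pending else ""
      let value := PySem.Str.join " | " value_cells
      let results' := if header != "" || value != "" then
          results ++ [PySem.Str.stripChars (header ++ ": " ++ value) ": "] else results
      goA rest [] results'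

def infer_headers (rows : List (List String)) (labels : List String) : List String :=
  goA (rows.zip labels) [] []

-- ===== PORT B =====
-- _fmt(header, row): the optional formatted line for one value row
def fmtRow (header : String) (row : List String) : Option String :=
  let value := PySem.Str.join " | " (row.filter (fun c => c != "" && !is_placeholder c))
  if header != "" || value != "" then
    some (PySem.Str.stripChars (header ++ ": " ++ value) ": ")
  else none

-- _emit_run(header, vals): only the first row of a value run sees the header
def emitRun : String → List (List String × String) → List String
  | _, [] => []
  | header, q :: vs =>
    (match fmtRow header q.1 with | some s => [s] | none => []) ++ emitRun "" vs

-- termination helper for runsB (cited by its decreasing_by)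
theorem drop2_lt {α : Type} (P : α → Bool) (x : α) (xs : List α) :
    (((x :: xs).dropWhile P).dropWhile (fun a => !P a)).length < (x :: xs).length := by
  by_cases h : P x
  · rw [List.dropWhile_cons_of_pos h]
    calc ((xs.dropWhile P).dropWhile (fun a => !P a)).length
        ≤ (xs.dropWhile P).length := List.length_dropWhile_le _ _
      _ ≤ xs.length := List.length_dropWhile_le _ _
      _ < (x :: xs).length := by simp
  · rw [List.dropWhile_cons_of_neg h, List.dropWhile_cons_of_pos (by simp [h])]
    calc (xs.dropWhile (fun a => !P a)).length
        ≤ xs.length := List.length_dropWhile_le _ _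
      _ < (x :: xs).length := by simp

-- _runs(pairs): split off the leading header run and the following value run, recurse on the rest
def runsB (pairs : List (List String × String)) : List String :=
  match pairs with
  | [] => []
  | p :: ps =>
    let hdr := (p :: ps).takeWhile (fun q => q.2 == "header")
    let header := PySem.Str.join " | " (hdr.map (fun q => hdrText q.1))
    let rest := (p :: ps).dropWhile (fun q => q.2 == "header")
    let vals := rest.takeWhile (fun q => q.2 != "header")
    let rest2 := rest.dropWhile (fun q => q.2 != "header")
    emitRun header vals ++ runsB rest2
termination_by pairs.length
decreasing_by exact drop2_lt _ p ps

def infer_headers_alt (rows : List (List String)) (labels : List String) : List String :=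
  runsB (rows.zip labels)

-- ===== PRECONDITION & SPEC =====
def Spec_infer_headers (rows : List (List String)) (labels : List String) (out : List String) : Prop := out = infer_headers_alt rows labels
instance (rows : List (List String)) (labels : List String) (out : List String) : Decidable (Spec_infer_headers rows labels out) := by unfold Spec_infer_headers; infer_instance

-- ===== CLAIM (what is proved, stated in full; the proofs are below) =====
def Claim_equal_infer_headers : Prop := ∀ (rows : List (List String)) (labels : List String), Dom_infer_headers rows labels → Spec_infer_headers rows labels (infer_headers rows labels)

-- ===== LEMMAS AND PROOFS =====

-- A's conditional append of a formatted line IS B's fmtRow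
theorem fmt_bridge (header : String) (row : List String) (res : List String) :
    (if (header != "" || PySem.Str.join " | " (row.filter (fun c => c != "" && !is_placeholder c)) != "") = true
        then res ++ [PySem.Str.stripChars (header ++ ": " ++ PySem.Str.join " | " (row.filter (fun c => c != "" && !is_placeholder c))) ": "]
        else res)
    = res ++ ((match fmtRow header row with | some s => [s] | none => []) : List String) := by
  simp only [fmtRow]
  by_cases hc : (header != "" || PySem.Str.join " | " (row.filter (fun c => c != "" && !is_placeholder c)) != "") = true
  · simp [hc]
  · simp [hc]

-- appending conditionally = appending a conditional singleton
theorem ite_append_eq {c : Prop} [Decidable c] (res : List String) (x : String) :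
    (if c then res ++ [x] else res) = res ++ (if c then [x] else []) := by
  split <;> simp

-- A's results accumulator only ever appends
theorem goA_res (pairs : List (List String × String)) :
    ∀ pending res, goA pairs pending res = res ++ goA pairs pending [] := by
  induction pairs with
  | nil => intro pending res; simp [goA]
  | cons q rest ih =>
    intro pending res
    obtain ⟨row, label⟩ := q
    by_cases h : (label == "header") = true
    · simp only [goA, h, if_pos]
      rw [ih, ih (pending ++ [hdrText row]) []]
    · simp only [goA, h, Bool.false_eq_true, if_false]
      rw [ite_append_eq, ite_append_eq]
      rw [ih _ (res ++ _), ih _ ([] ++ _)]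
      simp

-- a header run only extends pending_headers
theorem goA_headers (h : List (List String × String)) :
    ∀ (t : List (List String × String)) (pending res : List String),
      (∀ q ∈ h, (q.2 == "header") = true) →
      goA (h ++ t) pending res = goA t (pending ++ h.map (fun q => hdrText q.1)) res := by
  induction h with
  | nil => intro t pending res _; simp
  | cons q rest ih =>
    intro t pending res hall
    obtain ⟨row, label⟩ := q
    have hq : (label == "header") = true := hall (row, label) (by simp)
    simp only [List.cons_append, goA, hq, if_pos]
    rw [ih t _ res (fun r hr => hall r (by simp [hr]))]
    simp

-- a value run with empty pending emits one optional line per row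
theorem goA_values0 (v : List (List String × String)) :
    ∀ t, (∀ q ∈ v, (q.2 == "header") = false) →
      goA (v ++ t) [] [] = emitRun "" v ++ goA t [] [] := by
  induction v with
  | nil => intro t _; simp [emitRun]
  | cons q vs ih =>
    intro t hall
    obtain ⟨row, label⟩ := q
    have hq : (label == "header") = false := hall (row, label) (by simp)
    simp only [List.cons_append, goA, hq, Bool.false_eq_true, if_false, List.isEmpty_nil,
      Bool.true_eq_false]
    rw [fmt_bridge "" row []]
    rw [goA_res, ih t (fun r hr => hall r (by simp [hr]))]
    simp [emitRun]

-- a nonempty value run consumes the pending headers on its first row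
theorem goA_values (q : List String × String) (vs t : List (List String × String))
    (pending : List String) (hq : (q.2 == "header") = false)
    (hall : ∀ r ∈ vs, (r.2 == "header") = false) :
    goA ((q :: vs) ++ t) pending [] =
      emitRun (if pending.isEmpty = false then PySem.Str.join " | " pending else "") (q :: vs)
        ++ goA t [] [] := by
  obtain ⟨row, label⟩ := q
  simp only at hq
  simp only [List.cons_append, goA, hq, Bool.false_eq_true, if_false]
  rw [fmt_bridge _ row []]
  rw [goA_res, goA_values0 vs t hall]
  simp [emitRun]

-- the conditional join of pending headers is just the join (join of [] is "")
theorem hdrOf_eq (l : List String) :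
    (if l.isEmpty = false then PySem.Str.join " | " l else "") = PySem.Str.join " | " l := by
  cases l with
  | nil => decide
  | cons x xs => simp

theorem main_aux : ∀ (n : Nat) (pairs : List (List String × String)),
    pairs.length ≤ n → goA pairs [] [] = runsB pairs := by
  intro n
  induction n with
  | zero =>
    intro pairs h
    have : pairs = [] := List.eq_nil_of_length_eq_zero (Nat.le_zero.mp h)
    subst this; simp [goA, runsB]
  | succ n ih =>
    intro pairs hlen
    match pairs with
    | [] => simp [goA, runsB]
    | p :: ps =>
      have hgo : goA (p :: ps) [] [] =
          goA ((p :: ps).dropWhile (fun q => q.2 == "header"))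
            (((p :: ps).takeWhile (fun q => q.2 == "header")).map (fun q => hdrText q.1)) [] := by
        conv_lhs => rw [← List.takeWhile_append_dropWhile
          (p := fun q : List String × String => q.2 == "header") (l := p :: ps)]
        rw [goA_headers _ _ _ _ (fun q hq =>
          List.mem_takeWhile_imp (p := fun r : List String × String => r.2 == "header") hq)]
        simp
      cases hrest : (p :: ps).dropWhile (fun q => q.2 == "header") with
      | nil =>
        rw [hgo, hrest]
        simp [goA, runsB, hrest, emitRun]
      | cons q qs =>
        have hne : (p :: ps).dropWhile (fun r => r.2 == "header") ≠ [] := by simp [hrest]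
        have hqP : (q.2 == "header") = false := by
          have := List.head_dropWhile_not (p := fun r : List String × String => r.2 == "header")
            (l := p :: ps) hne
          simpa [hrest] using this
        have hvals : (q :: qs).takeWhile (fun r => r.2 != "header") =
            q :: qs.takeWhile (fun r => r.2 != "header") :=
          List.takeWhile_cons_of_pos (by simp [bne, hqP])
        have hvsplit : (q :: qs.takeWhile (fun r => r.2 != "header")) ++
            ((q :: qs).dropWhile (fun r => r.2 != "header")) = q :: qs := by
          rw [← hvals]; exact List.takeWhile_append_dropWhile
        have hall : ∀ r ∈ qs.takeWhile (fun r : List String × String => r.2 != "header"),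
            (r.2 == "header") = false := by
          intro r hr
          have := List.mem_takeWhile_imp hr
          simpa [bne] using this
        have hrest2len : ((q :: qs).dropWhile (fun r : List String × String => r.2 != "header")).length ≤ n := by
          have h2 := drop2_lt (fun r : List String × String => r.2 == "header") p ps
          rw [hrest] at h2
          have h3 : ((q :: qs).dropWhile (fun r : List String × String => r.2 != "header")).length
              < (p :: ps).length := by simpa [bne] using h2
          simp only [List.length_cons] at h3 hlen
          omega
        rw [hgo, hrest]
        conv_lhs => rw [← hvsplit]
        rw [goA_values q _ _ _ hqP hall, ih _ hrest2len]
        conv_rhs => rw [runsB.eq_def]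
        simp only [hrest, hvals]
        rw [hdrOf_eq]

theorem main_eq (pairs : List (List String × String)) : goA pairs [] [] = runsB pairs :=
  main_aux pairs.length pairs le_rfl

-- ===== VERDICT (by name: the statement is the Claim_ definition above) =====
theorem infer_headers_spec : Claim_equal_infer_headers := by
  intro rows labels _
  unfold Spec_infer_headers infer_headers infer_headers_alt
  exact main_eq (rows.zip labels)
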